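-- pv_equiv track=rewrite | github.com/Bictole/Google_Code_Jam | 2022/qualifications/d1000000.py | solve
-- ===== SOURCE A (Python) =====
-- def solve(n, arr):
--     res = 0
--
--     for i in range(n):
--         mini = min(arr)
--         arr.remove(mini)
--
--         if mini > res:
--             res += 1
--         else:
--             continue
--
--     return res
-- ===== SOURCE B (Python) =====
-- def solve(n, arr):
--     # Sort once, then one pass with a running counter (A repeatedly scans for
--     # and removes the minimum; note B does not mutate arr, unlike A).
--     res = 0
--     for v in sorted(arr)[:max(n, 0)]:
--         if v > res:
--             res += 1
--     return res
-- ===== Notes on version B (the rewrite author's own statement) =====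
-- stated objective: faster
-- what changed: Replaced the n repeated min-scan-and-remove passes with a single sort followed by one linear pass over the first n sorted values.
import Mathlib
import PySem

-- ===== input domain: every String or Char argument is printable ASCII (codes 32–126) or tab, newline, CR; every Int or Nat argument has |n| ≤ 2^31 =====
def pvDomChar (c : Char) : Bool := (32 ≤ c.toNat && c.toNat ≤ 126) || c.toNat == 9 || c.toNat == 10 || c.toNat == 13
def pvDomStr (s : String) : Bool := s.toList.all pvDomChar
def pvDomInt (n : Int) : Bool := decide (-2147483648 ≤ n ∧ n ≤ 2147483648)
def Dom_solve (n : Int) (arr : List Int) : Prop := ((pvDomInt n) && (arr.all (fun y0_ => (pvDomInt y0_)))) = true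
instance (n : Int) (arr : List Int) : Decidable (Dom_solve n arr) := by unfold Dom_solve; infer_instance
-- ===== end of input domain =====

-- B sorts once and makes a single pass instead of A's repeated min-scan-and-remove
-- (equivalence is about the return value: Python A mutates arr, B does not).


-- ===== PORT A =====
-- one iteration of A's 'for i in range(n)' body, recursing on the remaining iteration count
def solveGo (fuel : Nat) (arr : List Int) (res : Int) : Int :=
  match fuel with
  | 0 => res
  | k + 1 =>
    match PySem.List.min? arr (fun x => x) with
    | none => res   -- Python raises ValueError (min of empty) here; excluded by Pre_solve
    | some mini =>
      let arr' := (PySem.List.remove? arr mini).getD arr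
      solveGo k arr' (if mini > res then res + 1 else res)

def solve (n : Int) (arr : List Int) : Int :=
  solveGo n.toNat arr 0   -- range(n) runs max(n,0) iterations

-- ===== PORT B =====
def solve_alt (n : Int) (arr : List Int) : Int :=
  -- sorted(arr)[:max(n, 0)] : a nonnegative slice-to is List.take
  ((PySem.List.sorted arr (fun x => x) false).take (max n 0).toNat).foldl
    (fun res v => if v > res then res + 1 else res) 0

-- ===== PRECONDITION & SPEC =====
-- A raises ValueError (min of an empty list) when n exceeds len(arr)
def Pre_solve (n : Int) (arr : List Int) : Prop := n ≤ (arr.length : Int)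
instance (n : Int) (arr : List Int) : Decidable (Pre_solve n arr) := by unfold Pre_solve; infer_instance
def pvWitness_solve : Int × List Int := (3, [2, 1, 2])

def Spec_solve (n : Int) (arr : List Int) (out : Int) : Prop := out = solve_alt n arr
instance (n : Int) (arr : List Int) (out : Int) : Decidable (Spec_solve n arr out) := by unfold Spec_solve; infer_instance

-- ===== CLAIM (what is proved, stated in full; the proofs are below) =====
def Claim_equal_solve : Prop := ∀ (n : Int) (arr : List Int), Dom_solve n arr → Pre_solve n arr → Spec_solve n arr (solve n arr)

-- ===== LEMMAS AND PROOFS =====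

-- popping the minimum is taking the head of the sorted list
theorem sorted_cons_min (arr : List Int) (m : Int)
    (hm : PySem.List.min? arr (fun x => x) = some m) :
    PySem.List.sorted arr (fun x => x) false =
      m :: PySem.List.sorted (arr.erase m) (fun x => x) false := by
  have hmem : m ∈ arr := PySem.List.min?_mem hm
  apply PySem.List.sorted_id_eq_of_perm_of_pairwise
  · exact ((PySem.List.sorted_perm _ _ _).cons m).trans (List.perm_cons_erase hmem).symm
  · refine List.pairwise_cons.2 ⟨?_, PySem.List.sorted_pairwise _ _⟩
    intro y hy
    exact PySem.List.min?_isMin hm y (arr.mem_of_mem_erase ((PySem.List.mem_sorted _ _ _ _).1 hy))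

theorem solveGo_eq (k : Nat) (arr : List Int) (res : Int) (hk : k ≤ arr.length) :
    solveGo k arr res =
      ((PySem.List.sorted arr (fun x => x) false).take k).foldl
        (fun res v => if v > res then res + 1 else res) res := by
  induction k generalizing arr res with
  | zero => simp [solveGo]
  | succ k ih =>
    have hne : arr ≠ [] := by rintro rfl; simp at hk
    obtain ⟨m, hm⟩ : ∃ m, PySem.List.min? arr (fun x => x) = some m := by
      cases h : PySem.List.min? arr (fun x => x) with
      | none => exact absurd ((PySem.List.min?_eq_none_iff arr (fun x => x)).1 h) hne
      | some m => exact ⟨m, rfl⟩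
    have hmem : m ∈ arr := PySem.List.min?_mem hm
    have hrem : PySem.List.remove? arr m = some (arr.erase m) :=
      PySem.List.remove?_eq_some_erase arr m hmem
    have hlen : k ≤ (arr.erase m).length := by
      have := List.length_erase_of_mem hmem
      omega
    rw [sorted_cons_min arr m hm]
    simp only [solveGo, hm, hrem, Option.getD_some, List.take_succ_cons, List.foldl_cons]
    exact ih _ _ hlen

-- ===== VERDICT (by name: the statement is the Claim_ definition above) =====
theorem solve_spec : Claim_equal_solve := by
  intro n arr _ hpre
  unfold Spec_solve solve solve_alt
  have h1 : n.toNat ≤ arr.length := by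
    unfold Pre_solve at hpre; omega
  have h2 : (max n 0).toNat = n.toNat := by omega
  rw [h2, solveGo_eq n.toNat arr 0 h1]
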